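-- pv_equiv track=rewrite | github.com/jdavidberger/prjoxide | util/common/lapie.py | parse_sites
-- ===== SOURCE A (Python) =====
-- def parse_sites(rpt):
--     past_preamble = False
--     sites = []
--     for line in rpt.split('\n'):
--         sl = line.strip()
--
--         if not past_preamble:
--             past_preamble = "Successfully loading udb" in sl
--             continue
--
--         if "--------------------" in sl:
--             break
--
--         if len(sl):
--             sites.append(sl)
--
--     return sites
-- ===== SOURCE B (Python) =====
-- def parse_sites(rpt):
--     stripped = [line.strip() for line in rpt.split('\n')]
--     for i, sl in enumerate(stripped):
--         if "Successfully loading udb" in sl: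
--             rest = stripped[i + 1:]
--             cut = next((j for j, x in enumerate(rest) if "--------------------" in x), len(rest))
--             return [x for x in rest[:cut] if x]
--     return []
-- ===== Notes on version B (the rewrite author's own statement) =====
-- stated objective: simpler
-- what changed: Replaces A's stateful flag-and-break loop by a phase decomposition: strip all lines once, locate the marker line by index search, slice off everything before the dash line, and filter the non-empty lines.
import Mathlib
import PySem

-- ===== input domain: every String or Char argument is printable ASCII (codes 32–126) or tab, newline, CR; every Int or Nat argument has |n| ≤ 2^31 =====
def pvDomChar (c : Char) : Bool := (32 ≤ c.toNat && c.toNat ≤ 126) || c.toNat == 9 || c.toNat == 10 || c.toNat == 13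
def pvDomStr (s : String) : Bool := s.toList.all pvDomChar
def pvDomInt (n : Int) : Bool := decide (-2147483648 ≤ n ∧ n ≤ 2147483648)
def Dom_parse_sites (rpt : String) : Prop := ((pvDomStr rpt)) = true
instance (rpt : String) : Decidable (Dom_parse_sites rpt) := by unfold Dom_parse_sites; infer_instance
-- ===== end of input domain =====

-- B replaces A's stateful flag-and-break loop by a phase decomposition (strip once, index search, slice, filter); objective: simpler.

-- ===== PORT A =====
-- A's for-loop with the past_preamble flag, 'continue' and 'break', as structural recursion over the lines.
def parseSitesLoop (lines : List String) (past : Bool) (sites : List String) : List String :=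
  match lines with
  | [] => sites
  | line :: rest =>
    let sl := PySem.Str.strip line
    if !past then
      parseSitesLoop rest (PySem.Str.isIn "Successfully loading udb" sl) sites
    else if PySem.Str.isIn "--------------------" sl then
      sites
    else if PySem.Str.len sl ≠ 0 then
      parseSitesLoop rest past (sites ++ [sl])
    else
      parseSitesLoop rest past sites

def parse_sites (rpt : String) : List String :=
  parseSitesLoop ((PySem.Str.split? rpt "\n").getD []) false []

-- ===== PORT B =====
def parse_sites_alt (rpt : String) : List String :=
  let stripped := ((PySem.Str.split? rpt "\n").getD []).map PySem.Str.strip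
  match stripped.findIdx? (fun sl => PySem.Str.isIn "Successfully loading udb" sl) with
  | none => []
  | some i =>
    let rest := stripped.drop (i + 1)
    let cut := (rest.findIdx? (fun x => PySem.Str.isIn "--------------------" x)).getD rest.length
    (rest.take cut).filter (fun x => x != "")

-- ===== PRECONDITION & SPEC =====
def Spec_parse_sites (rpt : String) (out : List String) : Prop := out = parse_sites_alt rpt
instance (rpt : String) (out : List String) : Decidable (Spec_parse_sites rpt out) := by unfold Spec_parse_sites; infer_instance

-- ===== CLAIM (what is proved, stated in full; the proofs are below) =====
def Claim_equal_parse_sites : Prop := ∀ (rpt : String), Dom_parse_sites rpt → Spec_parse_sites rpt (parse_sites rpt)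

-- ===== LEMMAS AND PROOFS =====

-- A's loop with the two substring tests abstracted to predicates (keeps simp from rewriting them)
def gLoop (P Q : String → Bool) (ss : List String) (past : Bool) (sites : List String) : List String :=
  match ss with
  | [] => sites
  | sl :: rest =>
    match past with
    | false => gLoop P Q rest (P sl) sites
    | true =>
      if Q sl then sites
      else if (sl != "") then gLoop P Q rest true (sites ++ [sl])
      else gLoop P Q rest true sites

theorem strLen_ne_zero_iff (s : String) : (PySem.Str.len s ≠ 0) ↔ ((s != "") = true) := by
  simp [PySem.Str.len]

theorem parseSitesLoop_eq_gLoop (lines : List String) (past : Bool) (sites : List String) :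
    parseSitesLoop lines past sites =
      gLoop (fun sl => PySem.Str.isIn "Successfully loading udb" sl)
            (fun sl => PySem.Str.isIn "--------------------" sl)
            (lines.map PySem.Str.strip) past sites := by
  induction lines generalizing past sites with
  | nil => rfl
  | cons l rest ih =>
    cases past with
    | false => simp [parseSitesLoop, gLoop, ih]
    | true =>
      simp only [parseSitesLoop, gLoop, List.map, Bool.not_true, Bool.false_eq_true, if_false]
      by_cases hq : PySem.Str.isIn "--------------------" (PySem.Str.strip l) = true
      · rw [if_pos hq, if_pos hq]
      · rw [if_neg hq, if_neg hq]
        by_cases hs : PySem.Str.len (PySem.Str.strip l) ≠ 0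
        · rw [if_pos hs, if_pos ((strLen_ne_zero_iff _).mp hs), ih]
        · rw [if_neg hs, if_neg (fun h => hs ((strLen_ne_zero_iff _).mpr h)), ih]

-- the past=true phase: take up to the first dash line, keep the non-empty ones
theorem gLoop_true (P Q : String → Bool) (ss sites : List String) :
    gLoop P Q ss true sites =
      sites ++ ((ss.take ((ss.findIdx? Q).getD ss.length)).filter (fun x => x != "")) := by
  induction ss generalizing sites with
  | nil => simp [gLoop]
  | cons s rest ih =>
    by_cases hq : Q s = true
    · simp [gLoop, hq, List.findIdx?_cons]
    · have hq' : Q s = false := by simpa using hq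
      by_cases hs : (s != "") = true
      · simp only [gLoop, hq', if_false, Bool.false_eq_true, if_pos hs, ih,
          List.findIdx?_cons, List.append_assoc, List.singleton_append]
        cases h : rest.findIdx? Q <;> simp [hs]
      · have hs' : (s != "") = false := by simpa using hs
        simp only [gLoop, hq', if_false, Bool.false_eq_true, hs', ih, List.findIdx?_cons]
        cases h : rest.findIdx? Q <;> simp [hs']

-- the past=false phase: search for the marker line, then hand over to the past=true phase
theorem gLoop_false (P Q : String → Bool) (ss sites : List String) :
    gLoop P Q ss false sites =
      match ss.findIdx? P with
      | none => sites
      | some i => gLoop P Q (ss.drop (i + 1)) true sites := by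
  induction ss generalizing sites with
  | nil => simp [gLoop]
  | cons s rest ih =>
    by_cases hp : P s = true
    · simp [gLoop, hp, List.findIdx?_cons]
    · have hp' : P s = false := by simpa using hp
      simp only [gLoop, hp', ih, List.findIdx?_cons]
      cases h : rest.findIdx? P <;> simp

-- ===== VERDICT (by name: the statement is the Claim_ definition above) =====
theorem parse_sites_spec : Claim_equal_parse_sites := by
  intro rpt _
  unfold Spec_parse_sites parse_sites parse_sites_alt
  rw [parseSitesLoop_eq_gLoop, gLoop_false]
  cases h : (((PySem.Str.split? rpt "\n").getD []).map PySem.Str.strip).findIdx?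
      (fun sl => PySem.Str.isIn "Successfully loading udb" sl) with
  | none => simp only [h]
  | some i =>
    simp only [h, gLoop_true, List.nil_append]
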